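-- pv_equiv track=rewrite | github.com/mondeep31/DataAnalyticsLab | exp1/array/tuple/jointuples.py | join_tuples_if_similar_initial
-- ===== SOURCE A (Python) =====
-- def join_tuples_if_similar_initial(tuples_list):
--     result = []
--     current_tuple = tuples_list[0]
--     for next_tuple in tuples_list[1:]:
--         if current_tuple[0] == next_tuple[0]:
--             current_tuple = (current_tuple[0], current_tuple[1] + next_tuple[1])
--         else:
--             result.append(current_tuple)
--             current_tuple = next_tuple
--     result.append(current_tuple)
--     return result
-- ===== SOURCE B (Python) =====
-- def join_tuples_if_similar_initial(tuples_list):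
--     result = []
--     for key, value in reversed(tuples_list):
--         if result and result[0][0] == key:
--             result[0] = (key, value + result[0][1])
--         else:
--             result.insert(0, (key, value))
--     return result
-- ===== Notes on version B (the rewrite author's own statement) =====
-- stated objective: alternative
-- what changed: B scans the list right-to-left and merges each tuple into the head of the output being built (no current_tuple accumulator, no trailing append), instead of A's left-to-right loop carrying a pending tuple; B naturally returns [] where A raises IndexError on the empty list.
-- crash fix: On the empty list A raises IndexError (tuples_list[0]); B returns []. — e.g. on join_tuples_if_similar_initial([]): A raises IndexError, B returns []
import Mathlib
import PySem

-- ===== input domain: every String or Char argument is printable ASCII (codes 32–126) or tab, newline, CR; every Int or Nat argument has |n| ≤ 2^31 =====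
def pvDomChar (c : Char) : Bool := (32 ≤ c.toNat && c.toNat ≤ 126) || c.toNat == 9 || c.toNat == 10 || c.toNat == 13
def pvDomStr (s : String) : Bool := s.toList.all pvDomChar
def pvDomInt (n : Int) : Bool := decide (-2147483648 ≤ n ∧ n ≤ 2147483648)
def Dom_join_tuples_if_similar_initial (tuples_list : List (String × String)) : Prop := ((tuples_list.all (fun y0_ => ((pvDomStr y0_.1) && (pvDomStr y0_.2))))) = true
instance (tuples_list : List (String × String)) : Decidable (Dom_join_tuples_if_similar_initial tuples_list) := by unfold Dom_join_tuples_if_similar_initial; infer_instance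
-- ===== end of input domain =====

-- B merges right-to-left into the head of the output (no pending current_tuple, no
-- trailing append); alternative decomposition, not faster. On [] A raises, B returns [].

-- ===== PORT A =====
-- the body of A's for-loop: state is (result, current_tuple)
def stepA (st : List (String × String) × (String × String)) (next_tuple : String × String) :
    List (String × String) × (String × String) :=
  if st.2.1 == next_tuple.1 then
    (st.1, (st.2.1, st.2.2 ++ next_tuple.2))
  else
    (st.1 ++ [st.2], next_tuple)

-- A's loop over tuples_list[1:] carrying (result, current_tuple) is a foldl of stepA,
-- followed by result.append(current_tuple).
def join_tuples_if_similar_initial (tuples_list : List (String × String)) : List (String × String) :=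
  match PySem.List.pyGet? tuples_list 0 with
  | none => []   -- Python raises IndexError here; excluded by Pre_
  | some cur0 =>
    let st := (PySem.List.slice tuples_list (some 1) none).foldl stepA (([] : List (String × String)), cur0)
    st.1 ++ [st.2]

-- ===== PORT B =====
-- one step of B's loop body: merge (key, value) into the current head of result
def altStep (p : String × String) (result : List (String × String)) : List (String × String) :=
  match result with
  | q :: rest => if q.1 == p.1 then (p.1, p.2 ++ q.2) :: rest else p :: q :: rest
  | [] => [p]

-- 'for key, value in reversed(tuples_list): result = <merge into head>' is a foldr of altStep
def join_tuples_if_similar_initial_alt (tuples_list : List (String × String)) : List (String × String) :=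
  tuples_list.foldr altStep []

-- ===== PRECONDITION & SPEC =====
-- Pre_ excludes exactly the empty list, on which A raises IndexError (tuples_list[0]).
def Pre_join_tuples_if_similar_initial (tuples_list : List (String × String)) : Prop :=
  tuples_list ≠ []
instance (tuples_list : List (String × String)) : Decidable (Pre_join_tuples_if_similar_initial tuples_list) := by unfold Pre_join_tuples_if_similar_initial; infer_instance

def pvWitness_join_tuples_if_similar_initial : (List (String × String)) :=
  [("a", "x"), ("a", "y"), ("b", "z")]

-- On the empty list A raises IndexError (tuples_list[0]); B returns [].
def Raises_join_tuples_if_similar_initial (tuples_list : List (String × String)) : Prop :=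
  tuples_list = []
instance (tuples_list : List (String × String)) : Decidable (Raises_join_tuples_if_similar_initial tuples_list) := by unfold Raises_join_tuples_if_similar_initial; infer_instance
def pvRaiseWitness_join_tuples_if_similar_initial : (List (String × String)) := []
def pvRaiseWitnessOut_join_tuples_if_similar_initial : List (String × String) := []

def Spec_join_tuples_if_similar_initial (tuples_list : List (String × String)) (out : List (String × String)) : Prop := out = join_tuples_if_similar_initial_alt tuples_list
instance (tuples_list : List (String × String)) (out : List (String × String)) : Decidable (Spec_join_tuples_if_similar_initial tuples_list out) := by unfold Spec_join_tuples_if_similar_initial; infer_instance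

-- ===== CLAIM (what is proved, stated in full; the proofs are below) =====
def Claim_equal_join_tuples_if_similar_initial : Prop := ∀ (tuples_list : List (String × String)), Dom_join_tuples_if_similar_initial tuples_list → Pre_join_tuples_if_similar_initial tuples_list → Spec_join_tuples_if_similar_initial tuples_list (join_tuples_if_similar_initial tuples_list)

def Claim_raises_join_tuples_if_similar_initial : Prop := (∀ (tuples_list : List (String × String)), Dom_join_tuples_if_similar_initial tuples_list → Raises_join_tuples_if_similar_initial tuples_list → ¬ Pre_join_tuples_if_similar_initial tuples_list) ∧ (Dom_join_tuples_if_similar_initial (pvRaiseWitness_join_tuples_if_similar_initial) ∧ Raises_join_tuples_if_similar_initial (pvRaiseWitness_join_tuples_if_similar_initial) ∧ join_tuples_if_similar_initial_alt (pvRaiseWitness_join_tuples_if_similar_initial) = pvRaiseWitnessOut_join_tuples_if_similar_initial)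

-- ===== LEMMAS AND PROOFS =====

-- canonical recursive form of A's loop: pending tuple cur, remaining input l
def loopRec (cur : String × String) : List (String × String) → List (String × String)
  | [] => [cur]
  | n :: t => if cur.1 == n.1 then loopRec (cur.1, cur.2 ++ n.2) t else cur :: loopRec n t

theorem loopRec_ne_nil (c : String × String) (l : List (String × String)) :
    loopRec c l ≠ [] := by
  induction l generalizing c with
  | nil => simp [loopRec]
  | cons n t ih => simp only [loopRec]; split <;> simp [ih]

-- the head key of loopRec n t is n.1
theorem loopRec_head_key (t : List (String × String)) :
    ∀ (n q : String × String) (rest : List (String × String)),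
      loopRec n t = q :: rest → q.1 = n.1 := by
  induction t with
  | nil =>
    intro n q rest h
    simp only [loopRec, List.cons.injEq] at h
    rw [← h.1]
  | cons m t' ih =>
    intro n q rest h
    by_cases hm : (n.1 == m.1) = true
    · simp only [loopRec, if_pos hm] at h
      simpa using ih (n.1, n.2 ++ m.2) q rest h
    · simp only [loopRec, if_neg hm, List.cons.injEq] at h
      rw [← h.1]

-- A's foldl state, flushed at the end, equals res ++ loopRec cur l
theorem foldl_loopRec (l : List (String × String)) :
    ∀ (res : List (String × String)) (cur : String × String),
      (l.foldl stepA (res, cur)).1 ++ [(l.foldl stepA (res, cur)).2] = res ++ loopRec cur l := by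
  induction l with
  | nil => intro res cur; simp [loopRec]
  | cons n t ih =>
    intro res cur
    by_cases h : (cur.1 == n.1) = true
    · simp only [List.foldl, stepA, if_pos h, loopRec]
      exact ih res (cur.1, cur.2 ++ n.2)
    · simp only [List.foldl, stepA, if_neg h, loopRec]
      rw [ih (res ++ [cur]) n]
      simp

-- merging a pending tuple whose key matches into the group built by loopRec
theorem altStep_loopRec_merge (t : List (String × String)) :
    ∀ (n c : String × String), c.1 = n.1 →
      altStep c (loopRec n t) = loopRec (c.1, c.2 ++ n.2) t := by
  induction t with
  | nil =>
    intro n c h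
    simp [loopRec, altStep, h]
  | cons m t' ih =>
    intro n c h
    by_cases hm : (n.1 == m.1) = true
    · have hc : ((c.1, c.2 ++ n.2) : String × String).1 == m.1 := by
        simpa [h] using hm
      simp only [loopRec, if_pos hm, if_pos hc]
      rw [ih (n.1, n.2 ++ m.2) c h]
      simp [String.append_assoc]
    · have hc : ¬ (((c.1, c.2 ++ n.2) : String × String).1 == m.1) = true := by
        simpa [h] using hm
      simp only [loopRec, if_neg hm, if_neg hc, altStep]
      have hn : (n.1 == c.1) = true := by simp [h]
      simp [hn]

-- B's foldr on c :: t equals the canonical loop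
theorem alt_eq_loopRec (t : List (String × String)) :
    ∀ (c : String × String), (c :: t).foldr altStep [] = loopRec c t := by
  induction t with
  | nil => intro c; simp [altStep, loopRec]
  | cons n t' ih =>
    intro c
    show altStep c ((n :: t').foldr altStep []) = loopRec c (n :: t')
    rw [ih n]
    by_cases h : (c.1 == n.1) = true
    · rw [altStep_loopRec_merge t' n c (by simpa using h)]
      simp [loopRec, h]
    · obtain ⟨q, rest, hq⟩ : ∃ q rest, loopRec n t' = q :: rest := by
        cases hl : loopRec n t' with
        | nil => exact absurd hl (loopRec_ne_nil _ _)
        | cons a b => exact ⟨a, b, rfl⟩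
      have hqk : q.1 = n.1 := loopRec_head_key t' n q rest hq
      have hqc : ¬ (q.1 == c.1) = true := by
        simp only [hqk]
        intro hcon
        exact h (by simpa [beq_iff_eq] using (beq_iff_eq.mp hcon).symm)
      rw [hq]
      simp only [altStep, if_neg hqc, loopRec, if_neg h, ← hq]

-- ===== VERDICT (by name: the statement is the Claim_ definition above) =====
theorem join_tuples_if_similar_initial_spec : Claim_equal_join_tuples_if_similar_initial := by
  intro tl _ hpre
  cases tl with
  | nil => exact absurd rfl hpre
  | cons c t =>
    show join_tuples_if_similar_initial (c :: t) = join_tuples_if_similar_initial_alt (c :: t)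
    have h0 : PySem.List.pyGet? (c :: t) 0 = some c := by
      simp [PySem.List.pyGet?, PySem.List.pyIdx?]
    have h1 : PySem.List.slice (c :: t) (some 1) none = t := by
      simp [PySem.List.slice_from_one]
    rw [join_tuples_if_similar_initial, h0]
    simp only [h1]
    rw [foldl_loopRec t [] c]
    rw [join_tuples_if_similar_initial_alt, alt_eq_loopRec t c]
    simp

@[simp]
theorem join_tuples_if_similar_initial_raises : Claim_raises_join_tuples_if_similar_initial := by
  unfold Claim_raises_join_tuples_if_similar_initial
  exact ⟨fun tl _ hr hp => hp hr, by decide⟩
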